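-- pv_equiv track=rewrite | github.com/ghackebeil/pybnb | src/tests/mpi/test_misc.py | _get_logging_baseline
-- ===== SOURCE A (Python) =====
-- def _get_logging_baseline(size):
--     out = """[DEBUG] 0: debug
-- [INFO] 0: info
-- [WARNING] 0: warning
-- [ERROR] 0: error
-- [CRITICAL] 0: critical"""
--     for i in range(1, size):
--         out += (
--             (
--                 """
-- [DEBUG] %d: debug
-- [INFO] %d: info
-- [WARNING] %d: warning
-- [ERROR] %d: error
-- [CRITICAL] %d: critical"""
--             )
--             % (i, i, i, i, i)
--         )
--     return out
-- ===== SOURCE B (Python) =====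
-- _LEVELS = ["DEBUG", "INFO", "WARNING", "ERROR", "CRITICAL"]
--
--
-- def _get_logging_baseline(size):
--     return "\n".join(["[%s] %d: %s" % (lvl, i, lvl.lower())
--                       for i in range(max(size, 1))
--                       for lvl in _LEVELS])
-- ===== Notes on version B (the rewrite author's own statement) =====
-- stated objective: simpler
-- what changed: Replaces the hard-coded seed block plus an accumulating += loop of multi-line block literals with a flat list of single '[LEVEL] i: level' lines built over (process, level) pairs and joined with newline in one pass, clamping the range below by one so empty or negative sizes still yield the first process's block as A does.
import Mathlib
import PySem

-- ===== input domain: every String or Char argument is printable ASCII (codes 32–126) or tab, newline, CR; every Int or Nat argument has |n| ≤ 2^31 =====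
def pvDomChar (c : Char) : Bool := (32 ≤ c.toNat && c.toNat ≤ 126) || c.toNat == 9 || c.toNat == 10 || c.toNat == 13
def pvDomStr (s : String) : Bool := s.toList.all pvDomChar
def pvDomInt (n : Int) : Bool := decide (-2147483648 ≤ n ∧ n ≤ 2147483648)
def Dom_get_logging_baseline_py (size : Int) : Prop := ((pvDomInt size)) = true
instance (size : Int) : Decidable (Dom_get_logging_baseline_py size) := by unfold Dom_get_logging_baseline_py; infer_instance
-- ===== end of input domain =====

-- B replaces A's seed string + accumulating loop of 5-line blocks with a flat join of single "[LEVEL] i: level" lines over (process, level) pairs (objective: simpler).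


-- ===== PORT A =====
-- the "\n[DEBUG] %d: … [CRITICAL] %d: critical" % (i,i,i,i,i) string A appends each iteration
def pvBlockA (i : Int) : String :=
  "\n[DEBUG] " ++ PySem.Int.toStr i ++ ": debug\n[INFO] " ++ PySem.Int.toStr i ++
  ": info\n[WARNING] " ++ PySem.Int.toStr i ++ ": warning\n[ERROR] " ++ PySem.Int.toStr i ++
  ": error\n[CRITICAL] " ++ PySem.Int.toStr i ++ ": critical"

def get_logging_baseline_py (size : Int) : String :=
  (PySem.List.pyRange 1 size 1).foldl (fun out i => out ++ pvBlockA i)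
    "[DEBUG] 0: debug\n[INFO] 0: info\n[WARNING] 0: warning\n[ERROR] 0: error\n[CRITICAL] 0: critical"

-- ===== PORT B =====
def pvLevels : List String := ["DEBUG", "INFO", "WARNING", "ERROR", "CRITICAL"]

-- "[%s] %d: %s" % (lvl, i, lvl.lower())
def pvLine (lvl : String) (i : Int) : String :=
  "[" ++ lvl ++ "] " ++ PySem.Int.toStr i ++ ": " ++ PySem.Str.lower lvl

def get_logging_baseline_py_alt (size : Int) : String :=
  PySem.Str.join "\n"
    ((PySem.List.pyRange 0 (max size 1) 1).flatMap (fun i => pvLevels.map (fun lvl => pvLine lvl i)))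

-- ===== PRECONDITION & SPEC =====
def Spec_get_logging_baseline_py (size : Int) (out : String) : Prop := out = get_logging_baseline_py_alt size
instance (size : Int) (out : String) : Decidable (Spec_get_logging_baseline_py size out) := by unfold Spec_get_logging_baseline_py; infer_instance

-- ===== CLAIM (what is proved, stated in full; the proofs are below) =====
def Claim_equal_get_logging_baseline_py : Prop := ∀ (size : Int), Dom_get_logging_baseline_py size → Spec_get_logging_baseline_py size (get_logging_baseline_py size)

-- ===== LEMMAS AND PROOFS =====

-- the 5-line block for process i, as one string (proof-side abbreviation)
def pvBlock (i : Int) : String :=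
  "[DEBUG] " ++ PySem.Int.toStr i ++ ": debug\n[INFO] " ++ PySem.Int.toStr i ++
  ": info\n[WARNING] " ++ PySem.Int.toStr i ++ ": warning\n[ERROR] " ++ PySem.Int.toStr i ++
  ": error\n[CRITICAL] " ++ PySem.Int.toStr i ++ ": critical"

theorem pvBlockA_eq (i : Int) : pvBlockA i = "\n" ++ pvBlock i := by
  apply String.ext
  simp [pvBlockA, pvBlock]

theorem pvSeed_eq :
    ("[DEBUG] 0: debug\n[INFO] 0: info\n[WARNING] 0: warning\n[ERROR] 0: error\n[CRITICAL] 0: critical" : String)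
      = pvBlock 0 := by
  apply String.ext
  simp [pvBlock]
  decide

-- joining the five lines of one process gives its block
theorem pvJoinLines (i : Int) :
    PySem.Chars.join "\n".toList ((pvLevels.map (fun lvl => pvLine lvl i)).map String.toList)
      = (pvBlock i).toList := by
  simp only [pvLevels, List.map_cons, List.map_nil]
  rw [PySem.Chars.join_cons_cons, PySem.Chars.join_cons_cons, PySem.Chars.join_cons_cons,
      PySem.Chars.join_cons_cons, PySem.Chars.join_singleton]
  simp [pvLine, pvBlock, PySem.Str.lower, PySem.Chars.lower, PySem.Chars.lowerChar]
  decide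

-- peeling one process's five lines off the front of the flat join
theorem pvJoinFive (i : Int) (rest : List (List Char)) (h : rest ≠ []) :
    PySem.Chars.join "\n".toList ((pvLevels.map (fun lvl => pvLine lvl i)).map String.toList ++ rest)
      = (pvBlock i).toList ++ "\n".toList ++ PySem.Chars.join "\n".toList rest := by
  obtain ⟨r, rest', rfl⟩ := List.exists_cons_of_ne_nil h
  have h5 := pvJoinLines i
  simp only [pvLevels, List.map_cons, List.map_nil] at h5 ⊢
  rw [PySem.Chars.join_cons_cons, PySem.Chars.join_cons_cons, PySem.Chars.join_cons_cons,
      PySem.Chars.join_cons_cons, PySem.Chars.join_singleton] at h5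
  simp only [List.cons_append, List.nil_append]
  rw [PySem.Chars.join_cons_cons, PySem.Chars.join_cons_cons, PySem.Chars.join_cons_cons,
      PySem.Chars.join_cons_cons, PySem.Chars.join_cons_cons]
  simp [← h5, List.append_assoc]

-- the flat join over (process, level) pairs equals the join of per-process blocks
theorem pvJoinFlat (l : List Int) :
    PySem.Chars.join "\n".toList
        ((l.flatMap (fun i => pvLevels.map (fun lvl => pvLine lvl i))).map String.toList)
      = PySem.Chars.join "\n".toList ((l.map pvBlock).map String.toList) := by
  induction l with
  | nil => simp
  | cons a l ih =>
      cases l with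
      | nil =>
          simp only [List.flatMap_cons, List.flatMap_nil, List.append_nil, List.map_cons,
            List.map_nil]
          rw [PySem.Chars.join_singleton, ← pvJoinLines a]
      | cons b l' =>
          rw [List.flatMap_cons, List.map_append,
              pvJoinFive a _ (by simp [pvLevels, List.flatMap_cons]), ih]
          simp only [List.map_cons]
          rw [PySem.Chars.join_cons_cons]

-- shifting the separator-plus-head append into the first element of a join
theorem pvJoinShift (s t : String) (rest : List String) :
    PySem.Str.join "\n" ((s ++ ("\n" ++ t)) :: rest) = PySem.Str.join "\n" (s :: t :: rest) := by
  apply String.ext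
  cases rest with
  | nil => simp [PySem.Str.join, PySem.Chars.join, List.intercalate]
  | cons r rs =>
      simp only [PySem.Str.toList_join, List.map_cons]
      rw [PySem.Chars.join_cons_cons, PySem.Chars.join_cons_cons, PySem.Chars.join_cons_cons]
      simp [List.append_assoc]

theorem pvFoldl_join (l : List Int) (s : String) :
    l.foldl (fun out i => out ++ ("\n" ++ pvBlock i)) s
      = PySem.Str.join "\n" (s :: l.map pvBlock) := by
  induction l generalizing s with
  | nil =>
      apply String.ext
      simp [PySem.Str.join, PySem.Chars.join, List.intercalate]
  | cons a l ih =>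
      simp only [List.foldl_cons, List.map_cons]
      rw [ih, pvJoinShift]

-- ===== VERDICT (by name: the statement is the Claim_ definition above) =====
theorem get_logging_baseline_py_spec : Claim_equal_get_logging_baseline_py := by
  intro size _
  unfold Spec_get_logging_baseline_py get_logging_baseline_py get_logging_baseline_py_alt
  have halt : PySem.Str.join "\n"
      ((PySem.List.pyRange 0 (max size 1) 1).flatMap (fun i => pvLevels.map (fun lvl => pvLine lvl i)))
      = PySem.Str.join "\n" ((PySem.List.pyRange 0 (max size 1) 1).map pvBlock) := by
    apply String.ext
    simp only [PySem.Str.toList_join]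
    exact pvJoinFlat _
  rw [halt]
  simp only [pvBlockA_eq, pvSeed_eq, pvFoldl_join]
  rw [PySem.List.pyRange_one_cons (by omega : (0:Int) < max size 1), List.map_cons]
  by_cases h : 1 <= size
  . rw [show max size 1 = size by omega]
    norm_num
  . rw [show max size 1 = 1 by omega]
    norm_num
    rw [PySem.List.pyRange_one_eq_nil (by omega : size <= 1)]
    simp
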